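-- pv_equiv track=rewrite | github.com/tianyachen/data-structure-algorithm | 434-number-of-segments-in-a-string/number-of-segments-in-a-string.py | countSegments
-- ===== SOURCE A (Python) =====
-- def countSegments(s: str) -> int:
--     count = 0
--     i = 0
--     while i < len(s) and s[i] == ' ':
--         i += 1
--     if i != len(s):
--         count += 1
--
--     while i < len(s):
--         if s[i] == ' ' and i + 1 < len(s) and s[i + 1] != ' ':
--             count += 1
--         i += 1
--
--
--     return count
-- ===== SOURCE B (Python) =====
-- def countSegments(s: str) -> int:
--     return sum(1 for w in s.split(' ') if w)
-- ===== Notes on version B (the rewrite author's own statement) =====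
-- stated objective: idiomatic
-- what changed: Replaced the manual skip-leading-spaces-then-count-transitions index scan with a tokenize-then-count: split on the single-space separator and count the non-empty pieces.
import Mathlib
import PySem

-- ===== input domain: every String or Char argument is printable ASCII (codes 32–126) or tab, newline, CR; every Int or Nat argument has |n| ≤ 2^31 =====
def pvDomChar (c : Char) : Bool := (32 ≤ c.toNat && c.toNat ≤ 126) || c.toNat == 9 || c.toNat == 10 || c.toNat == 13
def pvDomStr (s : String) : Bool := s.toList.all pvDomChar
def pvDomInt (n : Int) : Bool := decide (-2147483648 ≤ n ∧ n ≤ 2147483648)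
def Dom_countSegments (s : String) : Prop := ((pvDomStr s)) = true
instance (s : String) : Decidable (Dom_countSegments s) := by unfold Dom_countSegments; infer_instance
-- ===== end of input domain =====

-- B replaces A's skip-leading-spaces-then-count-transitions index scan by split-on-' '-and-count-nonempty (idiomatic; same cost).

-- ===== PORT A =====
-- first while loop: advance i past leading spaces (= drop leading spaces of the rest)
def csSkip : List Char → List Char
  | [] => []
  | c :: rest => if c = ' ' then csSkip rest else c :: rest

-- second while loop: +1 whenever s[i] == ' ' and i+1 < len and s[i+1] != ' '
def csTrans : List Char → Int
  | c :: c2 :: rest => (if c = ' ' ∧ c2 ≠ ' ' then 1 else 0) + csTrans (c2 :: rest)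
  | _ => 0

def countSegments (s : String) : Int :=
  let t := csSkip s.toList
  (if t = [] then 0 else 1) + csTrans t

-- ===== PORT B =====
def countSegments_alt (s : String) : Int :=
  ((PySem.Chars.splitOn s.toList [' ']).countP (fun w => !w.isEmpty) : Nat)

-- ===== PRECONDITION & SPEC =====
def Spec_countSegments (s : String) (out : Int) : Prop := out = countSegments_alt s
instance (s : String) (out : Int) : Decidable (Spec_countSegments s out) := by unfold Spec_countSegments; infer_instance

-- ===== CLAIM (what is proved, stated in full; the proofs are below) =====
def Claim_equal_countSegments : Prop := ∀ (s : String), Dom_countSegments s → Spec_countSegments s (countSegments s)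

-- ===== LEMMAS AND PROOFS =====

-- canonical segment counter: flag = "currently inside a word"
def csCnt (b : Bool) : List Char → Int
  | [] => 0
  | c :: rest => if c = ' ' then csCnt false rest else (if b then 0 else 1) + csCnt true rest

-- simple recursive characterisation of split-on-space
def csSpl : List Char → List (List Char)
  | [] => [[]]
  | c :: rest => if c = ' ' then [] :: csSpl rest else (csSpl rest).modifyHead (c :: ·)

theorem csSpl_ne_nil (cs : List Char) : csSpl cs ≠ [] := by
  induction cs with
  | nil => simp [csSpl]
  | cons c rest ih =>
    simp only [csSpl]
    split_ifs
    · simp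
    · cases hse : csSpl rest with
      | nil => exact absurd hse ih
      | cons a b => simp [List.modifyHead]

theorem modifyHead_fun_id {α : Type} (l : List α) : List.modifyHead (fun x => x) l = l := by
  cases l <;> simp [List.modifyHead]

theorem splitOn_go_eq (fuel : Nat) :
    ∀ (cs cur : List Char) (acc : List (List Char)), cs.length < fuel →
    PySem.Chars.splitOn.go [' '] fuel cs cur acc
      = acc.reverse ++ (csSpl cs).modifyHead (fun x => cur.reverse ++ x) := by
  induction fuel with
  | zero => intro cs cur acc h; omega
  | succ fuel ih =>
    intro cs cur acc h
    cases cs with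
    | nil => simp [PySem.Chars.splitOn.go, csSpl]
    | cons c rest =>
      by_cases hc : c = ' '
      · subst hc
        rw [show PySem.Chars.splitOn.go [' '] (fuel+1) (' ' :: rest) cur acc
              = PySem.Chars.splitOn.go [' '] fuel rest [] (cur.reverse :: acc) from by
            simp [PySem.Chars.splitOn.go, List.isPrefixOf]]
        rw [ih rest [] (cur.reverse :: acc) (by simpa using Nat.lt_of_succ_lt_succ h)]
        simp [csSpl, modifyHead_fun_id]
      · rw [show PySem.Chars.splitOn.go [' '] (fuel+1) (c :: rest) cur acc
              = PySem.Chars.splitOn.go [' '] fuel rest (c :: cur) acc from by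
            simp only [PySem.Chars.splitOn.go, List.isPrefixOf, List.length_cons]
            simp
            exact fun h => absurd h.symm hc]
        rw [ih rest (c :: cur) acc (by simpa using Nat.lt_of_succ_lt_succ h)]
        simp only [csSpl, if_neg hc]
        obtain ⟨hh, t, hs⟩ : ∃ hh t, csSpl rest = hh :: t := by
          cases hse : csSpl rest with
          | nil => exact absurd hse (csSpl_ne_nil rest)
          | cons a b => exact ⟨a, b, rfl⟩
        simp [hs, List.modifyHead]

theorem splitOn_eq_csSpl (cs : List Char) :
    PySem.Chars.splitOn cs [' '] = csSpl cs := by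
  rw [show PySem.Chars.splitOn cs [' '] = PySem.Chars.splitOn.go [' '] (cs.length + 1) cs [] [] from rfl]
  rw [splitOn_go_eq (cs.length + 1) cs [] [] (by omega)]
  simp [modifyHead_fun_id]

theorem countP_csSpl (cs : List Char) :
    (((csSpl cs).tail.countP (fun w => !w.isEmpty) : Nat) : Int) = csCnt true cs ∧
    (((csSpl cs).countP (fun w => !w.isEmpty) : Nat) : Int) = csCnt false cs := by
  induction cs with
  | nil => simp [csSpl, csCnt, List.countP]
  | cons c rest ih =>
    by_cases hc : c = ' '
    · subst hc
      rw [show csSpl (' ' :: rest) = [] :: csSpl rest from by simp [csSpl]]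
      rw [show csCnt true (' ' :: rest) = csCnt false rest from by simp [csCnt]]
      rw [show csCnt false (' ' :: rest) = csCnt false rest from by simp [csCnt]]
      refine ⟨by simpa using ih.2, ?_⟩
      rw [List.countP_cons]
      simpa using ih.2
    · obtain ⟨hh, t, hs⟩ : ∃ hh t, csSpl rest = hh :: t := by
        cases hse : csSpl rest with
        | nil => exact absurd hse (csSpl_ne_nil rest)
        | cons a b => exact ⟨a, b, rfl⟩
      have ht : ((t.countP (fun w => !w.isEmpty) : Nat) : Int) = csCnt true rest := by
        simpa [hs] using ih.1
      simp only [csSpl, if_neg hc, hs, List.modifyHead, csCnt]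
      constructor
      · simpa using ht
      · rw [List.countP_cons]
        simp [ht]
        omega

-- A's transition loop equals the canonical counter (flag set by the current char)
theorem csTrans_eq (cs : List Char) :
    ∀ c, csTrans (c :: cs) = if c = ' ' then csCnt false cs else csCnt true cs := by
  induction cs with
  | nil => intro c; simp [csTrans, csCnt]
  | cons d rest ih =>
    intro c
    rw [show csTrans (c :: d :: rest) = (if c = ' ' ∧ d ≠ ' ' then 1 else 0) + csTrans (d :: rest) from rfl]
    rw [ih d]
    by_cases hc : c = ' ' <;> by_cases hd : d = ' ' <;>
      simp [csCnt, hc, hd]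

theorem countSegments_eq_csCnt (cs : List Char) :
    (if csSkip cs = [] then 0 else 1) + csTrans (csSkip cs) = csCnt false cs := by
  induction cs with
  | nil => simp [csSkip, csTrans, csCnt]
  | cons c rest ih =>
    by_cases hc : c = ' '
    · simpa [csSkip, hc, csCnt] using ih
    · simp only [csSkip, if_neg hc, csCnt]
      rw [csTrans_eq rest c]
      simp [hc]

-- ===== VERDICT (by name: the statement is the Claim_ definition above) =====
theorem countSegments_spec : Claim_equal_countSegments := by
  intro s _
  unfold Spec_countSegments countSegments countSegments_alt
  rw [splitOn_eq_csSpl]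
  rw [(countP_csSpl s.toList).2]
  exact countSegments_eq_csCnt s.toList
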